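-- pv_equiv track=rewrite | github.com/pypi-data/pypi-mirror-403 | packages/hhcli/hhcli-0.6.0-py3-none-any.whl/hhcli/ui/screens/history.py | _offset_to_location
-- ===== SOURCE A (Python) =====
-- def _offset_to_location(text: str, offset: int) -> tuple[int, int]:
--     """Переводит позицию в строке обратно в (строка, колонка)."""
--     offset = max(0, min(len(text), offset))
--     lines = text.splitlines(True)
--     if not lines:
--         return (0, 0)
--     current = 0
--     for idx, line in enumerate(lines):
--         next_offset = current + len(line)
--         if offset <= next_offset:
--             return (idx, offset - current)
--         current = next_offset
--     return (len(lines) - 1, len(lines[-1]))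
-- ===== SOURCE B (Python) =====
-- def _offset_to_location(text: str, offset: int) -> tuple[int, int]:
--     """Переводит позицию в строке обратно в (строка, колонка)."""
--     offset = max(0, min(len(text), offset))
--     lines = text.splitlines(True)
--     if not lines:
--         return (0, 0)
--     # prefix table of cumulative line ends, then binary search for the first
--     # line whose cumulative end is >= offset
--     ends = []
--     total = 0
--     for line in lines:
--         total += len(line)
--         ends.append(total)
--     lo, hi = 0, len(ends)
--     while lo < hi:
--         mid = (lo + hi) // 2
--         if ends[mid] < offset:
--             lo = mid + 1
--         else:
--             hi = mid
--     return (lo, offset - (ends[lo - 1] if lo > 0 else 0))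
-- ===== Notes on version B (the rewrite author's own statement) =====
-- stated objective: alternative
-- what changed: Replaces the linear accumulating scan over the lines with a cumulative-end prefix table plus a binary search (bisect_left) for the first line whose end is >= offset.
import Mathlib
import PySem

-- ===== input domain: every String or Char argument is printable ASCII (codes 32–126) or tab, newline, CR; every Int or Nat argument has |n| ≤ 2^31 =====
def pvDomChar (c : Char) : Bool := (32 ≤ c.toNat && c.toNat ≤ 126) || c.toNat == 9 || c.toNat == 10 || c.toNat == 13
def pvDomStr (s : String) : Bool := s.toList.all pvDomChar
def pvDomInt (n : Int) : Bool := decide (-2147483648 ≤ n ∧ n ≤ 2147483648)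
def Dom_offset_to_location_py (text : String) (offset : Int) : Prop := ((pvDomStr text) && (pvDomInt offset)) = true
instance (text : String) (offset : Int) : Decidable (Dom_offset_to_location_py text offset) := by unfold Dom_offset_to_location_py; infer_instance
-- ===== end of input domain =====

-- B replaces A's linear accumulating scan with a cumulative-end prefix table plus a
-- binary search for the first line whose cumulative end is >= offset (alternative algorithm).

-- ===== PORT A =====

-- Hand port of Python's str.splitlines(keepends=True), exact on Dom (there the only
-- line breaks are '\n', '\r' and '\r\n'; PySem.Str.splitlines drops the endings).
def pySplitlinesKeep : List Char → List (List Char)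
  | [] => []
  | '\r' :: '\n' :: rest => ['\r', '\n'] :: pySplitlinesKeep rest
  | c :: rest =>
      if c = '\n' || c = '\r' then [c] :: pySplitlinesKeep rest
      else match pySplitlinesKeep rest with
        | [] => [[c]]
        | l :: ls => (c :: l) :: ls

-- the 'for idx, line in enumerate(lines)' loop with its early return
def offsetLoopA : List (List Char) → Int → Int → Int → Option (Int × Int)
  | [], _, _, _ => none
  | l :: rest, idx, current, off =>
      let next := current + (l.length : Int)
      if off ≤ next then some (idx, off - current) else offsetLoopA rest (idx + 1) next off

def offset_to_location_py (text : String) (offset : Int) : Int × Int :=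
  let cs := text.toList
  let off := max 0 (min (cs.length : Int) offset)
  let lines := pySplitlinesKeep cs
  if lines = [] then (0, 0)
  else
    match offsetLoopA lines 0 0 off with
    | some r => r
    | none => ((lines.length : Int) - 1, ((lines.getLastD []).length : Int))

-- ===== PORT B =====

-- the 'for line in lines: total += len(line); ends.append(total)' loop
def buildEnds : List (List Char) → Int → List Int → List Int
  | [], _, acc => acc
  | l :: rest, total, acc => buildEnds rest (total + (l.length : Int)) (acc ++ [total + (l.length : Int)])

-- the 'while lo < hi' binary-search loop, transliterated with fuel hi - lo
-- (each iteration shrinks hi - lo, so the fuel is never exhausted);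
-- ends[mid] is always in range when called
def bsearchGo : Nat → List Int → Int → Nat → Nat → Nat
  | 0, _, _, lo, _ => lo
  | fuel + 1, ends, off, lo, hi =>
    if lo < hi then
      let mid := (lo + hi) / 2
      if ends.getD mid 0 < off then bsearchGo fuel ends off (mid + 1) hi
      else bsearchGo fuel ends off lo mid
    else lo

def bsearch (ends : List Int) (off : Int) (lo hi : Nat) : Nat :=
  bsearchGo (hi - lo) ends off lo hi

def offset_to_location_py_alt (text : String) (offset : Int) : Int × Int :=
  let cs := text.toList
  let off := max 0 (min (cs.length : Int) offset)
  let lines := pySplitlinesKeep cs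
  if lines = [] then (0, 0)
  else
    let ends := buildEnds lines 0 []
    let lo := bsearch ends off 0 ends.length
    ((lo : Int), off - (if lo > 0 then ends.getD (lo - 1) 0 else 0))

-- ===== PRECONDITION & SPEC =====
def Spec_offset_to_location_py (text : String) (offset : Int) (out : Int × Int) : Prop := out = offset_to_location_py_alt text offset
instance (text : String) (offset : Int) (out : Int × Int) : Decidable (Spec_offset_to_location_py text offset out) := by unfold Spec_offset_to_location_py; infer_instance

-- ===== CLAIM (what is proved, stated in full; the proofs are below) =====
def Claim_equal_offset_to_location_py : Prop := ∀ (text : String) (offset : Int), Dom_offset_to_location_py text offset → Spec_offset_to_location_py text offset (offset_to_location_py text offset)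

-- ===== LEMMAS AND PROOFS =====

-- prefix sums of the line lengths
def pvT (ls : List (List Char)) (k : Nat) : Int := (((ls.take k).map List.length).sum : Nat)

theorem pvT_zero (ls : List (List Char)) : pvT ls 0 = 0 := by simp [pvT]

theorem pvT_cons (l : List Char) (ls : List (List Char)) (k : Nat) :
    pvT (l :: ls) (k + 1) = (l.length : Int) + pvT ls k := by
  simp [pvT]

theorem pvT_nonneg (ls : List (List Char)) (k : Nat) : 0 ≤ pvT ls k :=
  Int.natCast_nonneg _

theorem pvT_mono (ls : List (List Char)) : ∀ (i j : Nat), i ≤ j → pvT ls i ≤ pvT ls j := by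
  induction ls with
  | nil => intro i j _; simp [pvT]
  | cons l ls ih =>
    intro i j hij
    cases i with
    | zero => rw [pvT_zero]; exact pvT_nonneg _ _
    | succ i =>
      cases j with
      | zero => omega
      | succ j =>
        rw [pvT_cons, pvT_cons]
        linarith [ih i j (by omega)]

theorem splitKeep_flatten (cs : List Char) : (pySplitlinesKeep cs).flatten = cs := by
  fun_induction pySplitlinesKeep cs
  all_goals simp_all

theorem pvT_full (cs : List Char) :
    pvT (pySplitlinesKeep cs) (pySplitlinesKeep cs).length = (cs.length : Int) := by
  unfold pvT
  rw [List.take_length]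
  have h : ((pySplitlinesKeep cs).map List.length).sum = cs.length := by
    rw [← List.length_flatten, splitKeep_flatten]
  rw [h]

def pEnds : List (List Char) → Int → List Int
  | [], _ => []
  | l :: rest, t => (t + (l.length : Int)) :: pEnds rest (t + (l.length : Int))

theorem buildEnds_eq (ls : List (List Char)) : ∀ (t : Int) (acc : List Int),
    buildEnds ls t acc = acc ++ pEnds ls t := by
  induction ls with
  | nil => intro t acc; simp [buildEnds, pEnds]
  | cons l ls ih => intro t acc; simp [buildEnds, pEnds, ih]

theorem pEnds_length (ls : List (List Char)) : ∀ t, (pEnds ls t).length = ls.length := by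
  induction ls with
  | nil => intro t; simp [pEnds]
  | cons l ls ih => intro t; simp [pEnds, ih]

theorem pEnds_getD (ls : List (List Char)) : ∀ (t : Int) (i : Nat), i < ls.length →
    (pEnds ls t).getD i 0 = t + pvT ls (i + 1) := by
  induction ls with
  | nil => intro t i h; simp at h
  | cons l ls ih =>
    intro t i h
    cases i with
    | zero => simp [pEnds, pvT_cons, pvT_zero]
    | succ i =>
      have := ih (t + (l.length : Int)) i (by simpa using Nat.lt_of_succ_lt_succ h)
      simp only [pEnds, List.getD_cons_succ, this, pvT_cons]
      ring

theorem offsetLoopA_spec (ls : List (List Char)) : ∀ (idx cur off : Int) (r : Nat),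
    r < ls.length →
    (∀ i < r, cur + pvT ls (i + 1) < off) →
    off ≤ cur + pvT ls (r + 1) →
    offsetLoopA ls idx cur off = some (idx + (r : Int), off - (cur + pvT ls r)) := by
  induction ls with
  | nil => intro _ _ _ r hr; simp at hr
  | cons l ls ih =>
    intro idx cur off r hr hlow hhigh
    cases r with
    | zero =>
      rw [pvT_cons, pvT_zero] at hhigh
      simp only [offsetLoopA]
      rw [if_pos (by omega)]
      simp [pvT_zero]
    | succ r =>
      have h0 : cur + (l.length : Int) < off := by
        have := hlow 0 (by omega)
        rwa [pvT_cons, pvT_zero, add_zero] at this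
      simp only [offsetLoopA]
      rw [if_neg (by omega)]
      have hrec := ih (idx + 1) (cur + (l.length : Int)) off r
        (by simpa using hr)
        (by intro i hi
            have := hlow (i + 1) (by omega)
            rw [pvT_cons] at this; omega)
        (by rw [pvT_cons] at hhigh; omega)
      rw [hrec, pvT_cons]
      simp only [Option.some.injEq, Prod.mk.injEq]
      exact ⟨by push_cast; ring, by ring⟩

theorem bsearchGo_spec (ends : List Int) (off : Int)
    (mono : ∀ i j, i ≤ j → j < ends.length → ends.getD i 0 ≤ ends.getD j 0) :
    ∀ (fuel lo hi : Nat), hi - lo ≤ fuel → lo ≤ hi → hi ≤ ends.length →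
    (∀ i < lo, ends.getD i 0 < off) →
    (∀ i, hi ≤ i → i < ends.length → off ≤ ends.getD i 0) →
    lo ≤ bsearchGo fuel ends off lo hi ∧ bsearchGo fuel ends off lo hi ≤ hi ∧
    (∀ i < bsearchGo fuel ends off lo hi, ends.getD i 0 < off) ∧
    (∀ i, bsearchGo fuel ends off lo hi ≤ i → i < ends.length → off ≤ ends.getD i 0) := by
  intro fuel
  induction fuel with
  | zero =>
    intro lo hi hfuel hle hhn hlow hhigh
    simp only [bsearchGo]
    refine ⟨le_refl _, hle, hlow, ?_⟩
    intro i h1 h2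
    exact hhigh i (by omega) h2
  | succ fuel ih =>
    intro lo hi hfuel hle hhn hlow hhigh
    simp only [bsearchGo]
    by_cases hlh : lo < hi
    · rw [if_pos hlh]
      by_cases hc : ends.getD ((lo + hi) / 2) 0 < off
      · rw [if_pos hc]
        have h1 : (lo + hi) / 2 + 1 ≤ hi := by omega
        have hlow' : ∀ i < (lo + hi) / 2 + 1, ends.getD i 0 < off := by
          intro i hi2
          exact lt_of_le_of_lt (mono i ((lo + hi) / 2) (by omega) (by omega)) hc
        have := ih ((lo + hi) / 2 + 1) hi (by omega) h1 hhn hlow' hhigh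
        exact ⟨by omega, this.2.1, this.2.2.1, this.2.2.2⟩
      · rw [if_neg hc]
        rw [not_lt] at hc
        have hhigh' : ∀ i, (lo + hi) / 2 ≤ i → i < ends.length → off ≤ ends.getD i 0 := by
          intro i hi1 hi2
          exact le_trans hc (mono ((lo + hi) / 2) i hi1 hi2)
        have := ih lo ((lo + hi) / 2) (by omega) (by omega) (by omega) hlow hhigh'
        exact ⟨this.1, by omega, this.2.2.1, this.2.2.2⟩
    · rw [if_neg hlh]
      refine ⟨le_refl _, hle, hlow, ?_⟩
      intro i h1 h2
      exact hhigh i (by omega) h2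

theorem bsearch_spec (ends : List Int) (off : Int)
    (mono : ∀ i j, i ≤ j → j < ends.length → ends.getD i 0 ≤ ends.getD j 0) :
    ∀ (lo hi : Nat), lo ≤ hi → hi ≤ ends.length →
    (∀ i < lo, ends.getD i 0 < off) →
    (∀ i, hi ≤ i → i < ends.length → off ≤ ends.getD i 0) →
    lo ≤ bsearch ends off lo hi ∧ bsearch ends off lo hi ≤ hi ∧
    (∀ i < bsearch ends off lo hi, ends.getD i 0 < off) ∧
    (∀ i, bsearch ends off lo hi ≤ i → i < ends.length → off ≤ ends.getD i 0) := by
  intro lo hi hle hhn hlow hhigh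
  exact bsearchGo_spec ends off mono (hi - lo) lo hi (le_refl _) hle hhn hlow hhigh

-- ===== VERDICT (by name: the statement is the Claim_ definition above) =====
theorem offset_to_location_py_spec : Claim_equal_offset_to_location_py := by
  intro text offset _
  unfold Spec_offset_to_location_py offset_to_location_py offset_to_location_py_alt
  simp only []
  by_cases hnil : pySplitlinesKeep text.toList = []
  · simp [hnil]
  · rw [if_neg hnil, if_neg hnil]
    set cs := text.toList with hcs
    set ls := pySplitlinesKeep cs with hls
    set o := max 0 (min (cs.length : Int) offset) with ho
    set n := ls.length with hn
    have hn1 : 1 ≤ n := by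
      rw [hn]
      exact Nat.pos_of_ne_zero (fun h => hnil (List.eq_nil_of_length_eq_zero h))
    have hends : buildEnds ls 0 [] = pEnds ls 0 := by
      rw [buildEnds_eq]; simp
    have hlen : (pEnds ls 0).length = n := pEnds_length ls 0
    have hgetD : ∀ i < n, (pEnds ls 0).getD i 0 = pvT ls (i + 1) := by
      intro i hi
      rw [pEnds_getD ls 0 i hi, zero_add]
    have mono : ∀ i j, i ≤ j → j < (pEnds ls 0).length → (pEnds ls 0).getD i 0 ≤ (pEnds ls 0).getD j 0 := by
      intro i j hij hj
      rw [hlen] at hj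
      rw [hgetD i (by omega), hgetD j hj]
      exact pvT_mono ls (i + 1) (j + 1) (by omega)
    have hototal : o ≤ pvT ls n := by
      rw [pvT_full]
      omega
    obtain ⟨h1, h2, h3, h4⟩ := bsearch_spec (pEnds ls 0) o mono 0 (pEnds ls 0).length
      (Nat.zero_le _) (le_refl _) (by omega) (by omega)
    set r := bsearch (pEnds ls 0) o 0 (pEnds ls 0).length with hr
    have hrn : r < n := by
      by_contra hcon
      have := h3 (n - 1) (by omega)
      rw [hgetD (n - 1) (by omega)] at this
      have hh : n - 1 + 1 = n := by omega
      rw [hh] at this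
      omega
    have hA : offsetLoopA ls 0 0 o = some (0 + (r : Int), o - (0 + pvT ls r)) := by
      apply offsetLoopA_spec ls 0 0 o r hrn
      · intro i hi
        have := h3 i (by omega)
        rw [hgetD i (by omega)] at this
        omega
      · have := h4 r (le_refl _) (by omega)
        rw [hgetD r hrn] at this
        omega
    rw [hends, hA, zero_add, zero_add]
    have hcol : o - pvT ls r = o - (if r > 0 then (pEnds ls 0).getD (r - 1) 0 else 0) := by
      by_cases hr0 : r > 0
      · rw [if_pos hr0, hgetD (r - 1) (by omega)]
        have : r - 1 + 1 = r := by omega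
        rw [this]
      · rw [if_neg hr0]
        have : r = 0 := by omega
        rw [this, pvT_zero]
    rw [hcol]
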